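-- pv_equiv track=rewrite | github.com/dawngerpony/algorithms | python/katas/hired_practice_assessment.py | solution
-- ===== SOURCE A (Python) =====
-- def solution(arr):
--     """ The solution. """
--     if len(arr) == 0:
--         return ""
--     left_sum = right_sum = 0
--     arr = [i if i != -1 else 0 for i in arr]
--     del arr[0]
--     jump = 1
--     while len(arr) > 0:
--         left_sum += sum(arr[0:jump])
--         right_sum += sum(arr[jump:jump+jump])
--         del arr[0:jump+jump]
--         jump *= 2
--     if left_sum > right_sum:
--         return "Left"
--     if right_sum > left_sum:
--         return "Right"
--     if left_sum == right_sum: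
--         return ""
-- ===== SOURCE B (Python) =====
-- def solution(arr):
--     """ Single left-to-right pass: a side/remaining/size state machine replaces
--     A's chunk-slicing and list deletion. """
--     if not arr:
--         return ""
--     left = right = 0
--     side_left, rem, size = True, 1, 1
--     for v in arr[1:]:
--         if v == -1:
--             v = 0
--         if side_left:
--             left += v
--         else:
--             right += v
--         rem -= 1
--         if rem == 0:
--             if side_left:
--                 side_left, rem = False, size
--             else:
--                 size *= 2
--                 side_left, rem = True, size
--     if left > right:
--         return "Left"
--     if right > left:
--         return "Right"
--     return ""
-- ===== Notes on version B (the rewrite author's own statement) =====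
-- stated objective: alternative
-- what changed: Replaces A's preprocessing pass plus doubling-chunk loop that repeatedly slices and deletes list prefixes with a single left-to-right pass driven by a side/remaining/chunk-size state machine, with no list copies or deletions.
import Mathlib
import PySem

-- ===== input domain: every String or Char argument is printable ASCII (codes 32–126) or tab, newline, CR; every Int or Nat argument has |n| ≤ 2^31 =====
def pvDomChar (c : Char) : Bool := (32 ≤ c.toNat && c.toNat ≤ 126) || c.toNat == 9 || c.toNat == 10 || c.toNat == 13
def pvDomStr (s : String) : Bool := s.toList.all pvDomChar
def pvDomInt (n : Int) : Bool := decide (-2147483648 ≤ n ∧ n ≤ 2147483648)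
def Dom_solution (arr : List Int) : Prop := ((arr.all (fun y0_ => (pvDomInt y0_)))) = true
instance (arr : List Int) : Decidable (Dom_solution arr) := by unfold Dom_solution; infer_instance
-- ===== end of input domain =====

-- B replaces A's slice-and-delete doubling-chunk loop by a single left-to-right pass
-- with a side/remaining/size state machine (objective: alternative).


-- ===== PORT A =====
-- the while-loop: state (arr, jump, left_sum, right_sum); jump is always ≥ 1,
-- represented as j+1 so that the recursion on the shrinking list terminates.
-- arr[0:jump] = take jump, arr[jump:jump+jump] = take jump ∘ drop jump,
-- del arr[0:jump+jump] = drop (jump+jump): exact for these nonnegative bounds.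
def solLoopA (a : List Int) (j : Nat) (l r : Int) : Int × Int :=
  if a = [] then (l, r)
  else solLoopA (a.drop ((j+1)+(j+1))) (2*j+1)
        (l + (a.take (j+1)).sum) (r + ((a.drop (j+1)).take (j+1)).sum)
termination_by a.length
decreasing_by
  simp only [List.length_drop]
  rename_i h
  have : a.length ≠ 0 := by simpa [List.length_eq_zero_iff] using h
  omega

def solution (arr : List Int) : String :=
  if arr.length = 0 then ""
  else
    let arr1 := arr.map (fun i => if i ≠ -1 then i else 0)
    let arr2 := arr1.drop 1          -- del arr[0]
    let lr := solLoopA arr2 0 0 0    -- jump = 1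
    if lr.1 > lr.2 then "Left"
    else if lr.2 > lr.1 then "Right"
    else ""                          -- left_sum == right_sum here

-- ===== PORT B =====
-- loop body of Source B: state (left, right, side_left, rem, size)
def solStepB (st : Int × Int × Bool × Nat × Nat) (v : Int) : Int × Int × Bool × Nat × Nat :=
  let (l, r, sideLeft, rem, size) := st
  let v := if v = -1 then 0 else v
  let (l, r) := if sideLeft then (l + v, r) else (l, r + v)
  let rem := rem - 1
  if rem = 0 then
    if sideLeft then (l, r, false, size, size)
    else (l, r, true, 2*size, 2*size)
  else (l, r, sideLeft, rem, size)

def solution_alt (arr : List Int) : String :=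
  match arr with
  | [] => ""
  | _ :: rest =>
    let st := rest.foldl solStepB (0, 0, true, 1, 1)
    let l := st.1
    let r := st.2.1
    if l > r then "Left"
    else if r > l then "Right"
    else ""

-- ===== PRECONDITION & SPEC =====
def Spec_solution (arr : List Int) (out : String) : Prop := out = solution_alt arr
instance (arr : List Int) (out : String) : Decidable (Spec_solution arr out) := by unfold Spec_solution; infer_instance

-- ===== CLAIM (what is proved, stated in full; the proofs are below) =====
def Claim_equal_solution : Prop := ∀ (arr : List Int), Dom_solution arr → Spec_solution arr (solution arr)

-- ===== LEMMAS AND PROOFS =====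

def solF (i : Int) : Int := if i ≠ -1 then i else 0

def solSumF (a : List Int) : Int := (a.map solF).sum

-- running B's step over a whole list while the remaining count covers it
-- only ever adds to the current side's accumulator
theorem solStep_partial_left : ∀ (a : List Int) (m sz : Nat) (l r : Int),
    a.length ≤ m + 1 →
    ((a.foldl solStepB (l, r, true, m+1, sz)).1 = l + solSumF a ∧
     (a.foldl solStepB (l, r, true, m+1, sz)).2.1 = r) := by
  intro a
  induction a with
  | nil => intro m sz l r _; simp [solSumF]
  | cons v t ih =>
    intro m sz l r h
    simp only [List.length_cons] at h
    match m with
    | 0 =>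
      have ht : t = [] := by
        have : t.length = 0 := by omega
        simpa [List.length_eq_zero_iff] using this
      subst ht
      by_cases hv : v = -1 <;> simp [solStepB, solF, solSumF, hv]
    | m' + 1 =>
      have hstep : solStepB (l, r, true, m'+1+1, sz) v
          = (l + solF v, r, true, m'+1, sz) := by
        by_cases hv : v = -1 <;> simp [solStepB, solF, hv]
      have := ih m' sz (l + solF v) r (by omega)
      simp only [List.foldl_cons, hstep]
      refine ⟨?_, this.2⟩
      rw [this.1]; simp [solSumF]; ring

theorem solStep_partial_right : ∀ (a : List Int) (m sz : Nat) (l r : Int),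
    a.length ≤ m + 1 →
    ((a.foldl solStepB (l, r, false, m+1, sz)).1 = l ∧
     (a.foldl solStepB (l, r, false, m+1, sz)).2.1 = r + solSumF a) := by
  intro a
  induction a with
  | nil => intro m sz l r _; simp [solSumF]
  | cons v t ih =>
    intro m sz l r h
    simp only [List.length_cons] at h
    match m with
    | 0 =>
      have ht : t = [] := by
        have : t.length = 0 := by omega
        simpa [List.length_eq_zero_iff] using this
      subst ht
      by_cases hv : v = -1 <;> simp [solStepB, solF, solSumF, hv]
    | m' + 1 =>
      have hstep : solStepB (l, r, false, m'+1+1, sz) v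
          = (l, r + solF v, false, m'+1, sz) := by
        by_cases hv : v = -1 <;> simp [solStepB, solF, hv]
      have := ih m' sz l (r + solF v) (by omega)
      simp only [List.foldl_cons, hstep]
      refine ⟨this.1, ?_⟩
      rw [this.2]; simp [solSumF]; ring

theorem solStep_full_left : ∀ (m : Nat) (a : List Int) (sz : Nat) (l r : Int),
    m + 1 ≤ a.length →
    a.foldl solStepB (l, r, true, m+1, sz)
      = (a.drop (m+1)).foldl solStepB (l + solSumF (a.take (m+1)), r, false, sz, sz) := by
  intro m
  induction m with
  | zero =>
    intro a sz l r h
    match a with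
    | [] => simp at h
    | v :: t =>
      simp only [List.foldl_cons, List.drop_succ_cons, List.drop_zero, List.take_succ_cons,
        List.take_zero]
      have : solStepB (l, r, true, 1, sz) v = (l + solF v, r, false, sz, sz) := by
        by_cases hv : v = -1 <;> simp [solStepB, solF, hv]
      rw [this]; simp [solSumF]
  | succ m ih =>
    intro a sz l r h
    match a with
    | [] => simp at h
    | v :: t =>
      simp only [List.length_cons] at h
      have hstep : solStepB (l, r, true, m+1+1, sz) v = (l + solF v, r, true, m+1, sz) := by
        by_cases hv : v = -1 <;> simp [solStepB, solF, hv]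
      simp only [List.foldl_cons, hstep, List.drop_succ_cons, List.take_succ_cons]
      rw [ih t sz (l + solF v) r (by omega)]
      congr 1
      simp [solSumF]; ring

-- completing a right run of length m+1 switches back to the left with doubled size
theorem solStep_full_right : ∀ (m : Nat) (a : List Int) (sz : Nat) (l r : Int),
    m + 1 ≤ a.length →
    a.foldl solStepB (l, r, false, m+1, sz)
      = (a.drop (m+1)).foldl solStepB (l, r + solSumF (a.take (m+1)), true, 2*sz, 2*sz) := by
  intro m
  induction m with
  | zero =>
    intro a sz l r h
    match a with
    | [] => simp at h
    | v :: t =>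
      simp only [List.foldl_cons, List.drop_succ_cons, List.drop_zero, List.take_succ_cons,
        List.take_zero]
      have : solStepB (l, r, false, 1, sz) v = (l, r + solF v, true, 2*sz, 2*sz) := by
        by_cases hv : v = -1 <;> simp [solStepB, solF, hv]
      rw [this]; simp [solSumF]
  | succ m ih =>
    intro a sz l r h
    match a with
    | [] => simp at h
    | v :: t =>
      simp only [List.length_cons] at h
      have hstep : solStepB (l, r, false, m+1+1, sz) v = (l, r + solF v, false, m+1, sz) := by
        by_cases hv : v = -1 <;> simp [solStepB, solF, hv]
      simp only [List.foldl_cons, hstep, List.drop_succ_cons, List.take_succ_cons]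
      rw [ih t sz l (r + solF v) (by omega)]
      congr 1
      simp [solSumF]; ring

theorem solSumF_take_drop (a : List Int) (n : Nat) :
    ((a.map solF).drop n).take n = ((a.drop n).take n).map solF := by
  simp [List.map_take, List.map_drop]

-- the central invariant: A's loop over the mapped list equals B's fold at a fresh
-- left chunk of size j+1
theorem solLoop_eq_aux : ∀ (n : Nat) (a : List Int), a.length ≤ n → ∀ (j : Nat) (l r : Int),
    solLoopA (a.map solF) j l r
      = ((a.foldl solStepB (l, r, true, j+1, j+1)).1,
         (a.foldl solStepB (l, r, true, j+1, j+1)).2.1) := by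
  intro n
  induction n with
  | zero =>
    intro a hn j l r
    have : a = [] := by simpa [List.length_eq_zero_iff] using Nat.le_zero.mp hn
    subst this; simp [solLoopA]
  | succ n ih =>
    intro a hn j l r
    by_cases ha : a = []
    · subst ha; simp [solLoopA]
    · rw [solLoopA]
      simp only [List.map_eq_nil_iff, if_neg ha]
      have htakemap : ∀ n, ((a.map solF).take n).sum = solSumF (a.take n) := by
        intro n; simp [solSumF, List.map_take]
      have hsum2 : (((a.map solF).drop (j+1)).take (j+1)).sum
          = solSumF ((a.drop (j+1)).take (j+1)) := by
        rw [solSumF_take_drop]; rfl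
      rw [htakemap, hsum2]
      by_cases h1 : a.length ≤ j + 1
      · -- everything fits in the first (left) chunk
        have hd : (a.map solF).drop ((j+1)+(j+1)) = [] := by
          simp [List.drop_eq_nil_iff]; omega
        have hd2 : (a.drop (j+1)).take (j+1) = [] := by
          simp [List.take_eq_nil_iff, List.drop_eq_nil_iff]; omega
        rw [hd, hd2, solLoopA]
        have hp := solStep_partial_left a j (j+1) l r h1
        have hta : a.take (j+1) = a := List.take_of_length_le h1
        simp [hp.1, hp.2, hta, solSumF]
      · push_neg at h1
        have hfl := solStep_full_left j a (j+1) l r (by omega)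
        by_cases h2 : a.length ≤ (j+1)+(j+1)
        · -- run ends inside the right chunk
          have hd : (a.map solF).drop ((j+1)+(j+1)) = [] := by
            simp [List.drop_eq_nil_iff]; omega
          rw [hd, solLoopA, hfl]
          have hlen : (a.drop (j+1)).length ≤ j + 1 := by
            simp [List.length_drop]; omega
          have hp := solStep_partial_right (a.drop (j+1)) j (j+1)
            (l + solSumF (a.take (j+1))) r hlen
          have htr : (a.drop (j+1)).take (j+1) = a.drop (j+1) := List.take_of_length_le hlen
          simp [hp.1, hp.2, htr]
        · -- both chunks complete; recurse with doubled jump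
          push_neg at h2
          rw [hfl, solStep_full_right j (a.drop (j+1)) (j+1)
            (l + solSumF (a.take (j+1))) r (by simp [List.length_drop]; omega)]
          have hdd : (a.drop (j+1)).drop (j+1) = a.drop ((j+1)+(j+1)) := by
            simp [List.drop_drop]
          have hmd : (a.map solF).drop ((j+1)+(j+1)) = (a.drop ((j+1)+(j+1))).map solF := by
            simp [List.map_drop]
          have h2j : (2*j+1)+1 = (j+1)+(j+1) := by ring
          rw [hdd, hmd, ih (a.drop ((j+1)+(j+1))) (by simp [List.length_drop]; omega)
            (2*j+1) (l + solSumF (a.take (j+1)))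
            (r + solSumF ((a.drop (j+1)).take (j+1))), h2j]
          simp [two_mul]

theorem solLoop_eq (a : List Int) (j : Nat) (l r : Int) :
    solLoopA (a.map solF) j l r
      = ((a.foldl solStepB (l, r, true, j+1, j+1)).1,
         (a.foldl solStepB (l, r, true, j+1, j+1)).2.1) :=
  solLoop_eq_aux a.length a le_rfl j l r

-- ===== VERDICT (by name: the statement is the Claim_ definition above) =====
theorem solution_spec : Claim_equal_solution := by
  intro arr _
  unfold Spec_solution solution solution_alt
  match arr with
  | [] => rfl
  | x :: rest =>
    simp only [List.length_cons, List.map_cons, List.drop_succ_cons, List.drop_zero]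
    rw [if_neg (by omega)]
    rw [show (fun i : Int => if i ≠ -1 then i else 0) = solF from rfl]
    simp only [solLoop_eq rest 0 0 0]
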